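-- pv_equiv track=rewrite | github.com/filipkrasniqi/QoSML | supervised-learning-qos-learning/libs/columns.py | build_columns_routing
-- ===== SOURCE A (Python) =====
-- def build_columns_routing(num_nodes):
--     columns = []
--     for i in range(0,num_nodes):
--         for j in range(0, num_nodes):
--             for k in range(0,num_nodes):
--                 for l in range(0, num_nodes):
--                     columns.append('OD_{}_{} link_{}_{}'.format(str(i),str(j), str(k), str(l)))
--     return columns
-- ===== SOURCE B (Python) =====
-- def build_columns_routing(num_nodes):
--     od = ['OD_{}_{}'.format(i, j) for i in range(num_nodes) for j in range(num_nodes)]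
--     link = ['link_{}_{}'.format(k, l) for k in range(num_nodes) for l in range(num_nodes)]
--     return [o + ' ' + lk for o in od for lk in link]
-- ===== Notes on version B (the rewrite author's own statement) =====
-- stated objective: simpler
-- what changed: Replaces the four-deep appending loop by building the n^2 OD-name and link-name tables once and combining them in a single Cartesian-product pass.
import Mathlib
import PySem

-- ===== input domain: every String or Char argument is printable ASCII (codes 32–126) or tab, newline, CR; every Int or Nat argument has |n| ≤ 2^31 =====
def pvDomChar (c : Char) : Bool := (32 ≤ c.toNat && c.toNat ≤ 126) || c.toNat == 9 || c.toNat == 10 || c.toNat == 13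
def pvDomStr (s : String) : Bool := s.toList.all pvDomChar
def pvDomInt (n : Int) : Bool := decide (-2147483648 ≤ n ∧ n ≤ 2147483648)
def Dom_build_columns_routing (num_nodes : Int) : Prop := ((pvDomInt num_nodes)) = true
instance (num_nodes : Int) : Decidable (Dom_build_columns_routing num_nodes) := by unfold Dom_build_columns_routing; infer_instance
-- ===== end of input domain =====

-- B builds the n^2 OD and link name tables once and combines them in one Cartesian-product pass,
-- replacing A's four-deep appending loop (objective: simpler decomposition, same output).

-- ===== PORT A =====
def build_columns_routing (num_nodes : Int) : List String :=
  (PySem.List.pyRange 0 num_nodes 1).foldl (fun columns i =>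
    (PySem.List.pyRange 0 num_nodes 1).foldl (fun columns j =>
      (PySem.List.pyRange 0 num_nodes 1).foldl (fun columns k =>
        (PySem.List.pyRange 0 num_nodes 1).foldl (fun columns l =>
          columns ++ ["OD_" ++ PySem.Int.toStr i ++ "_" ++ PySem.Int.toStr j ++
                      " link_" ++ PySem.Int.toStr k ++ "_" ++ PySem.Int.toStr l])
          columns) columns) columns) []

-- ===== PORT B =====
def build_columns_routing_alt (num_nodes : Int) : List String :=
  let r := PySem.List.pyRange 0 num_nodes 1
  let od := r.flatMap (fun i => r.map (fun j =>
    "OD_" ++ PySem.Int.toStr i ++ "_" ++ PySem.Int.toStr j))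
  let link := r.flatMap (fun k => r.map (fun l =>
    "link_" ++ PySem.Int.toStr k ++ "_" ++ PySem.Int.toStr l))
  od.flatMap (fun o => link.map (fun lk => o ++ " " ++ lk))

-- ===== PRECONDITION & SPEC =====
def Spec_build_columns_routing (num_nodes : Int) (out : List String) : Prop := out = build_columns_routing_alt num_nodes
instance (num_nodes : Int) (out : List String) : Decidable (Spec_build_columns_routing num_nodes out) := by unfold Spec_build_columns_routing; infer_instance

-- ===== CLAIM (what is proved, stated in full; the proofs are below) =====
def Claim_equal_build_columns_routing : Prop := ∀ (num_nodes : Int), Dom_build_columns_routing num_nodes → Spec_build_columns_routing num_nodes (build_columns_routing num_nodes)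

-- ===== LEMMAS AND PROOFS =====
theorem space_link_append (s : String) : " " ++ ("link_" ++ s) = " link_" ++ s := by
  rw [← String.append_assoc]; rfl

-- ===== VERDICT (by name: the statement is the Claim_ definition above) =====
theorem build_columns_routing_spec : Claim_equal_build_columns_routing := by
  intro n _
  unfold Spec_build_columns_routing build_columns_routing build_columns_routing_alt
  simp only [PySem.List.foldl_append_singleton_eq_map, PySem.List.foldl_append_eq_flatMap,
    List.nil_append, List.flatMap_map, List.map_flatMap, List.flatMap_assoc, List.map_map]
  simp [Function.comp_def, String.append_assoc, space_link_append]
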